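-- pv_equiv track=rewrite | github.com/leaf76/report_gen | report_gui/ui_helpers.py | _ordered_results
-- ===== SOURCE A (Python) =====
-- from typing import Iterator, Tuple, TYPE_CHECKING
--
-- _PREFERRED_ORDER = ["PASS", "FAIL", "ERROR", "SKIP", "UNKNOWN"]
--
-- def _ordered_results(by_result: dict[str, int]) -> Iterator[Tuple[str, int]]:
--     seen: set[str] = set()
--     for result in _PREFERRED_ORDER:
--         if result in by_result:
--             yield result, by_result[result]
--             seen.add(result)
--     for result, count in by_result.items():
--         if result not in seen:
--             yield result, count
-- ===== SOURCE B (Python) =====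
-- _PREFERRED_ORDER = ["PASS", "FAIL", "ERROR", "SKIP", "UNKNOWN"]
--
--
-- def _ordered_results(by_result):
--     # Bucket sort by rank: one pass distributing items into n+1 buckets
--     # (one per preferred key, one for the rest), then emit the buckets.
--     n = len(_PREFERRED_ORDER)
--     rank = {k: i for i, k in enumerate(_PREFERRED_ORDER)}
--     buckets = [[] for _ in range(n + 1)]
--     for item in by_result.items():
--         buckets[rank.get(item[0], n)].append(item)
--     for bucket in buckets:
--         yield from bucket
-- ===== Notes on version B (the rewrite author's own statement) =====
-- stated objective: alternative
-- what changed: Replaces A's two explicit passes (scan _PREFERRED_ORDER probing the dict while recording a seen set, then rescan items skipping seen keys) by a one-pass bucket sort: a rank dict maps each preferred key to its bucket, every item is distributed into one of n+1 buckets in a single pass over the items, and the buckets are emitted in order.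
import Mathlib
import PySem

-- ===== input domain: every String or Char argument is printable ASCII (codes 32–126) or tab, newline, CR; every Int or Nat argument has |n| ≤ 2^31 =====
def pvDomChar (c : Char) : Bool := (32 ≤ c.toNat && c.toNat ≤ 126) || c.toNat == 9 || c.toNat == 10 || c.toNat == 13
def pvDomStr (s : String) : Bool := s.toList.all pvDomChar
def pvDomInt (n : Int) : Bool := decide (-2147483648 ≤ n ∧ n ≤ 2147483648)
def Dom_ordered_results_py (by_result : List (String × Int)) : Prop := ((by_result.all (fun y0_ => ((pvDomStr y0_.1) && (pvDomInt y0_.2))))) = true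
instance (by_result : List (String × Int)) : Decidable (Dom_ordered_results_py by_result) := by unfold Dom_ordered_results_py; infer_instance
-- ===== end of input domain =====

-- B replaces A's two passes (probe the preferred keys recording a seen set, then rescan the
-- items skipping seen keys) by a one-pass bucket sort keyed by a rank dict; same cost, alternative structure.

def pvPref : List String := ["PASS", "FAIL", "ERROR", "SKIP", "UNKNOWN"]

-- ===== PORT A =====
def ordered_results_py (by_result : List (String × Int)) : List (String × Int) :=
  let d : PySem.Dict String Int := PySem.Dict.mk by_result
  -- seen = set(); for result in _PREFERRED_ORDER: if result in by_result: yield …; seen.add(result)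
  let loop1 := pvPref.foldl
    (fun (acc : List (String × Int) × PySem.Set String) result =>
      if d.contains result then
        -- by_result[result]: getD is exact here, the contains guard rules out KeyError
        (acc.1 ++ [(result, d.getD result 0)], acc.2.add result)
      else acc)
    ([], PySem.Set.empty)
  -- for result, count in by_result.items(): if result not in seen: yield result, count
  d.items.foldl
    (fun out kv => if kv.1 ∉ loop1.2 then out ++ [kv] else out)
    loop1.1

-- ===== PORT B =====
def ordered_results_py_alt (by_result : List (String × Int)) : List (String × Int) :=
  let n := pvPref.length
  -- rank = {k: i for i, k in enumerate(_PREFERRED_ORDER)}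
  let rank : PySem.Dict String Int :=
    (PySem.List.enumerate pvPref).foldl (fun d ik => d.insert ik.2 ik.1) PySem.Dict.empty
  -- buckets = [[] for _ in range(n + 1)]
  let buckets0 : List (List (String × Int)) := List.replicate (n + 1) []
  -- for item in by_result.items(): buckets[rank.get(item[0], n)].append(item)
  let buckets := (PySem.Dict.mk by_result).items.foldl
    (fun bs item =>
      -- the index rank.get(item[0], n) is always in 0..n, so .toNat/.set/.getD are exact
      let r := (rank.getD item.1 (n : Int)).toNat
      bs.set r (bs.getD r [] ++ [item]))
    buckets0
  -- for bucket in buckets: yield from bucket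
  buckets.flatten

-- ===== PRECONDITION & SPEC =====
-- Pre_ excludes association lists with duplicate keys: A's parameter is a Python dict, which
-- cannot hold duplicate keys, so such lists do not represent any input of A.
def Pre_ordered_results_py (by_result : List (String × Int)) : Prop :=
  (by_result.map Prod.fst).Nodup
instance (by_result : List (String × Int)) : Decidable (Pre_ordered_results_py by_result) := by
  unfold Pre_ordered_results_py; infer_instance

def pvWitness_ordered_results_py : (List (String × Int)) := [("FAIL", 2), ("zzz", 1)]

def Spec_ordered_results_py (by_result : List (String × Int)) (out : List (String × Int)) : Prop := out = ordered_results_py_alt by_result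
instance (by_result : List (String × Int)) (out : List (String × Int)) : Decidable (Spec_ordered_results_py by_result out) := by unfold Spec_ordered_results_py; infer_instance

-- ===== CLAIM (what is proved, stated in full; the proofs are below) =====
def Claim_equal_ordered_results_py : Prop := ∀ (by_result : List (String × Int)), Dom_ordered_results_py by_result → Pre_ordered_results_py by_result → Spec_ordered_results_py by_result (ordered_results_py by_result)

-- ===== LEMMAS AND PROOFS =====

-- the singleton [(k, v)] when k is a key of l (with its first value), else []
def pvOpt (l : List (String × Int)) (k : String) : List (String × Int) :=
  match (PySem.Dict.mk l).get? k with
  | some v => [(k, v)]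
  | none => []

-- the bucket index B computes: position in pvPref, or 5
def pvRk (k : String) : Nat :=
  if k = "PASS" then 0 else if k = "FAIL" then 1 else if k = "ERROR" then 2
  else if k = "SKIP" then 3 else if k = "UNKNOWN" then 4 else 5

-- B's rank dict lookup computes pvRk
theorem pv_rank_eq (k : String) :
    (((PySem.List.enumerate pvPref).foldl (fun d ik => d.insert ik.2 ik.1)
      PySem.Dict.empty : PySem.Dict String Int).getD k ((pvPref.length : Int))).toNat = pvRk k := by
  have h : ((PySem.List.enumerate pvPref).foldl (fun d ik => d.insert ik.2 ik.1)
      PySem.Dict.empty : PySem.Dict String Int)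
      = PySem.Dict.mk [("PASS",0),("FAIL",1),("ERROR",2),("SKIP",3),("UNKNOWN",4)] := by rfl
  rw [h]
  by_cases h0 : k = "PASS"; · subst h0; decide
  by_cases h1 : k = "FAIL"; · subst h1; decide
  by_cases h2 : k = "ERROR"; · subst h2; decide
  by_cases h3 : k = "SKIP"; · subst h3; decide
  by_cases h4 : k = "UNKNOWN"; · subst h4; decide
  simp [PySem.Dict.getD_eq_get?_getD, pvRk, pvPref,
    h0, h1, h2, h3, h4, Ne.symm h0, Ne.symm h1, Ne.symm h2, Ne.symm h3, Ne.symm h4,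
    PySem.Dict.get?]

-- A's first loop appends the present preferred keys and records them in seen
theorem pv_loop1_eq (l : List (String × Int)) (ps : List String)
    (acc : List (String × Int)) (seen : PySem.Set String) :
    ps.foldl
      (fun (acc : List (String × Int) × PySem.Set String) result =>
        if (PySem.Dict.mk l).contains result then
          (acc.1 ++ [(result, (PySem.Dict.mk l).getD result 0)], acc.2.add result)
        else acc) (acc, seen)
    = (acc ++ ps.flatMap (pvOpt l),
       ps.foldl (fun s p => if (PySem.Dict.mk l).contains p then s.add p else s) seen) := by
  induction ps generalizing acc seen with
  | nil => simp
  | cons p ps ih =>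
    simp only [List.foldl_cons, List.flatMap_cons]
    by_cases h : (PySem.Dict.mk l).contains p = true
    · rw [if_pos h, if_pos h, ih]
      rcases hg : (PySem.Dict.mk l).get? p with _ | v
      · rw [PySem.Dict.contains_eq_isSome_get?, hg] at h; simp at h
      · simp [pvOpt, hg, PySem.Dict.getD_eq_get?_getD]
    · rw [if_neg h, if_neg h, ih]
      have hg : (PySem.Dict.mk l).get? p = none := by
        rw [PySem.Dict.contains_eq_isSome_get?] at h
        cases hx : (PySem.Dict.mk l).get? p <;> simp [hx] at h ⊢
      simp [pvOpt, hg]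

-- membership in the seen set built by A's first loop
theorem pv_seen_mem (l : List (String × Int)) (ps : List String) (seen : PySem.Set String) (k : String) :
    k ∈ ps.foldl (fun s p => if (PySem.Dict.mk l).contains p then s.add p else s) seen
    ↔ k ∈ seen ∨ (k ∈ ps ∧ (PySem.Dict.mk l).contains k = true) := by
  induction ps generalizing seen with
  | nil => simp
  | cons p ps ih =>
    simp only [List.foldl_cons, List.mem_cons]
    by_cases h : (PySem.Dict.mk l).contains p = true
    · rw [if_pos h, ih]
      simp only [PySem.Set.mem_add]
      constructor
      · rintro ((hs | rfl) | ⟨hm, hc⟩)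
        · exact .inl hs
        · exact .inr ⟨.inl rfl, h⟩
        · exact .inr ⟨.inr hm, hc⟩
      · rintro (hs | ⟨(rfl | hm), hc⟩)
        · exact .inl (.inl hs)
        · exact .inl (.inr rfl)
        · exact .inr ⟨hm, hc⟩
    · rw [if_neg h, ih]
      constructor
      · rintro (hs | ⟨hm, hc⟩)
        · exact .inl hs
        · exact .inr ⟨.inr hm, hc⟩
      · rintro (hs | ⟨(rfl | hm), hc⟩)
        · exact .inl hs
        · exact absurd hc h
        · exact .inr ⟨hm, hc⟩

-- A in closed form: present preferred keys first, then the non-preferred items in order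
theorem pv_A_eq (l : List (String × Int)) :
    ordered_results_py l
    = pvPref.flatMap (pvOpt l) ++ l.filter (fun kv => decide (kv.1 ∉ pvPref)) := by
  simp only [ordered_results_py, pv_loop1_eq, List.nil_append]
  rw [
    PySem.List.foldl_append_ite_eq_filter (fun kv : String × Int =>
      kv.1 ∉ pvPref.foldl (fun s p => if (PySem.Dict.mk l).contains p then s.add p else s)
        PySem.Set.empty)]
  congr 1
  apply List.filter_congr
  intro kv hkv
  have hc : (PySem.Dict.mk l).contains kv.1 = true := by
    rw [PySem.Dict.contains_eq_decide_mem_keys, PySem.Dict.keys_mk]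
    simp
    exact ⟨kv.2, hkv⟩
  simp only [decide_eq_decide]
  rw [not_iff_not, pv_seen_mem]
  simp [PySem.Set.empty, hc]

-- B's distribution loop fills the six buckets with the items of each rank, in order
theorem pv_bucket_eq (l : List (String × Int)) (c0 c1 c2 c3 c4 c5 : List (String × Int)) :
    l.foldl (fun bs item =>
        let r := pvRk item.1
        bs.set r (bs.getD r [] ++ [item])) [c0, c1, c2, c3, c4, c5]
    = [c0 ++ l.filter (fun kv => pvRk kv.1 == 0), c1 ++ l.filter (fun kv => pvRk kv.1 == 1),
       c2 ++ l.filter (fun kv => pvRk kv.1 == 2), c3 ++ l.filter (fun kv => pvRk kv.1 == 3),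
       c4 ++ l.filter (fun kv => pvRk kv.1 == 4), c5 ++ l.filter (fun kv => pvRk kv.1 == 5)] := by
  induction l generalizing c0 c1 c2 c3 c4 c5 with
  | nil => simp
  | cons a t ih =>
    have h6 : pvRk a.1 = 0 ∨ pvRk a.1 = 1 ∨ pvRk a.1 = 2 ∨ pvRk a.1 = 3 ∨ pvRk a.1 = 4 ∨
        pvRk a.1 = 5 := by unfold pvRk; split_ifs <;> simp
    simp only [List.foldl_cons]
    rcases h6 with h|h|h|h|h|h
    · rw [show ([c0, c1, c2, c3, c4, c5].set (pvRk a.1)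
          ([c0, c1, c2, c3, c4, c5].getD (pvRk a.1) [] ++ [a]))
          = [c0 ++ [a], c1, c2, c3, c4, c5] from by simp [h, List.getD], ih]
      simp [h]
    · rw [show ([c0, c1, c2, c3, c4, c5].set (pvRk a.1)
          ([c0, c1, c2, c3, c4, c5].getD (pvRk a.1) [] ++ [a]))
          = [c0, c1 ++ [a], c2, c3, c4, c5] from by simp [h, List.getD], ih]
      simp [h]
    · rw [show ([c0, c1, c2, c3, c4, c5].set (pvRk a.1)
          ([c0, c1, c2, c3, c4, c5].getD (pvRk a.1) [] ++ [a]))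
          = [c0, c1, c2 ++ [a], c3, c4, c5] from by simp [h, List.getD], ih]
      simp [h]
    · rw [show ([c0, c1, c2, c3, c4, c5].set (pvRk a.1)
          ([c0, c1, c2, c3, c4, c5].getD (pvRk a.1) [] ++ [a]))
          = [c0, c1, c2, c3 ++ [a], c4, c5] from by simp [h, List.getD], ih]
      simp [h]
    · rw [show ([c0, c1, c2, c3, c4, c5].set (pvRk a.1)
          ([c0, c1, c2, c3, c4, c5].getD (pvRk a.1) [] ++ [a]))
          = [c0, c1, c2, c3, c4 ++ [a], c5] from by simp [h, List.getD], ih]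
      simp [h]
    · rw [show ([c0, c1, c2, c3, c4, c5].set (pvRk a.1)
          ([c0, c1, c2, c3, c4, c5].getD (pvRk a.1) [] ++ [a]))
          = [c0, c1, c2, c3, c4, c5 ++ [a]] from by simp [h, List.getD], ih]
      simp [h]

-- with no duplicate keys, the items whose key equals s are exactly pvOpt l s
theorem pv_filter_key (l : List (String × Int)) (h : (l.map Prod.fst).Nodup) (s : String) :
    l.filter (fun kv => kv.1 == s) = pvOpt l s := by
  induction l with
  | nil => simp [pvOpt, PySem.Dict.get?]
  | cons a t ih =>
    obtain ⟨k0, v0⟩ := a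
    simp only [List.map_cons, List.nodup_cons] at h
    by_cases he : k0 = s
    · subst he
      have hfilt : t.filter (fun kv => kv.1 == k0) = [] := by
        rw [List.filter_eq_nil_iff]
        intro kv hkv
        simp only [beq_iff_eq]
        intro hks
        exact h.1 (by rw [← hks]; exact List.mem_map_of_mem hkv)
      simp [pvOpt, PySem.Dict.get?_mk_cons, hfilt]
    · have := ih h.2
      simp [pvOpt, PySem.Dict.get?_mk_cons, he] at this ⊢
      exact this

-- rank i < 5 means key = pvPref[i]; rank 5 means key not preferred
theorem pv_rk_iff (k : String) :
    ((pvRk k == 0) = (k == "PASS")) ∧ ((pvRk k == 1) = (k == "FAIL")) ∧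
    ((pvRk k == 2) = (k == "ERROR")) ∧ ((pvRk k == 3) = (k == "SKIP")) ∧
    ((pvRk k == 4) = (k == "UNKNOWN")) ∧ ((pvRk k == 5) = decide (k ∉ pvPref)) := by
  unfold pvRk
  by_cases h0 : k = "PASS"; · subst h0; decide
  by_cases h1 : k = "FAIL"; · subst h1; decide
  by_cases h2 : k = "ERROR"; · subst h2; decide
  by_cases h3 : k = "SKIP"; · subst h3; decide
  by_cases h4 : k = "UNKNOWN"; · subst h4; decide
  simp [h0, h1, h2, h3, h4, pvPref]

-- ===== VERDICT (by name: the statement is the Claim_ definition above) =====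
theorem ordered_results_py_spec : Claim_equal_ordered_results_py := by
  intro l _hdom hpre
  unfold Spec_ordered_results_py
  rw [pv_A_eq]
  simp only [ordered_results_py_alt]
  have hf : (fun (bs : List (List (String × Int))) item =>
      bs.set (((PySem.List.enumerate pvPref).foldl (fun d ik => d.insert ik.2 ik.1)
        PySem.Dict.empty : PySem.Dict String Int).getD item.1 ((pvPref.length : Int))).toNat
        (bs.getD (((PySem.List.enumerate pvPref).foldl (fun d ik => d.insert ik.2 ik.1)
        PySem.Dict.empty : PySem.Dict String Int).getD item.1 ((pvPref.length : Int))).toNat []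
          ++ [item]))
      = (fun (bs : List (List (String × Int))) item =>
        let r := pvRk item.1
        bs.set r (bs.getD r [] ++ [item])) := by
    funext bs item
    rw [pv_rank_eq]
  rw [show (List.replicate (pvPref.length + 1) ([] : List (String × Int)))
      = [[], [], [], [], [], []] from rfl]
  rw [hf, pv_bucket_eq]
  have hr := fun k => pv_rk_iff k
  rw [show (fun kv : String × Int => pvRk kv.1 == 0) = (fun kv => kv.1 == "PASS") from
        funext fun kv => (hr kv.1).1,
      show (fun kv : String × Int => pvRk kv.1 == 1) = (fun kv => kv.1 == "FAIL") from
        funext fun kv => (hr kv.1).2.1,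
      show (fun kv : String × Int => pvRk kv.1 == 2) = (fun kv => kv.1 == "ERROR") from
        funext fun kv => (hr kv.1).2.2.1,
      show (fun kv : String × Int => pvRk kv.1 == 3) = (fun kv => kv.1 == "SKIP") from
        funext fun kv => (hr kv.1).2.2.2.1,
      show (fun kv : String × Int => pvRk kv.1 == 4) = (fun kv => kv.1 == "UNKNOWN") from
        funext fun kv => (hr kv.1).2.2.2.2.1,
      show (fun kv : String × Int => pvRk kv.1 == 5) = (fun kv => decide (kv.1 ∉ pvPref)) from
        funext fun kv => (hr kv.1).2.2.2.2.2]
  rw [pv_filter_key l hpre, pv_filter_key l hpre, pv_filter_key l hpre,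
      pv_filter_key l hpre, pv_filter_key l hpre]
  simp [pvPref]
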